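-- pv_equiv track=rewrite | github.com/junbohuang/story-perceptions | src/open_coding_utils.py | hard_filter_codes
-- ===== SOURCE A (Python) =====
-- def hard_filter_codes(codes, type_to_keep, ignore_discourse_nouns=False):
--     if type_to_keep == 'feature':
--         codes = [code for code in codes if '1' in code]
--     elif type_to_keep == 'discourse':
--         codes = [code for code in codes if '2' in code]
--
--     if ignore_discourse_nouns:
--         codes = [code for code in codes if '*' in code]
--
--     return codes
-- ===== SOURCE B (Python) =====
-- def hard_filter_codes(codes, type_to_keep, ignore_discourse_nouns=False):
--     required = []
--     if type_to_keep == 'feature':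
--         required.append('1')
--     elif type_to_keep == 'discourse':
--         required.append('2')
--     if ignore_discourse_nouns:
--         required.append('*')
--     return [code for code in codes if all(m in code for m in required)]
-- ===== Notes on version B (the rewrite author's own statement) =====
-- stated objective: simpler
-- what changed: B precomputes the list of required marker substrings and does a single filtering pass with all(), instead of A's up-to-two sequential list-comprehension passes.
import Mathlib
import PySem

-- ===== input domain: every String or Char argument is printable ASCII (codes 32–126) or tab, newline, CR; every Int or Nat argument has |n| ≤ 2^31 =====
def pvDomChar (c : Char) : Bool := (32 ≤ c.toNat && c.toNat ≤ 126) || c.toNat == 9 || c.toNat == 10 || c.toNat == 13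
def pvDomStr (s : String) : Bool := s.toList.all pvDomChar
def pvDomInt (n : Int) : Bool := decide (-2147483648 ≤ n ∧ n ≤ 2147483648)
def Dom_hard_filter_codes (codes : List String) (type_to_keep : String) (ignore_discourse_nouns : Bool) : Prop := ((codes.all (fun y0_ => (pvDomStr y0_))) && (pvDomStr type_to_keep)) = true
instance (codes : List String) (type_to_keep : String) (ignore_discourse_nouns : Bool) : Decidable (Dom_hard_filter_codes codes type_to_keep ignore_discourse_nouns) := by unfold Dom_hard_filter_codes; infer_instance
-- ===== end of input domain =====

-- ===== PORT A =====
-- B precomputes the required marker substrings and filters once; A filters in up to two passes. Same return value; A may return the input object itself (aliasing only).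
def hard_filter_codes (codes : List String) (type_to_keep : String) (ignore_discourse_nouns : Bool) : List String :=
  let codes1 :=
    if type_to_keep == "feature" then codes.filter (fun code => PySem.Str.isIn "1" code)
    else if type_to_keep == "discourse" then codes.filter (fun code => PySem.Str.isIn "2" code)
    else codes
  let codes2 :=
    if ignore_discourse_nouns then codes1.filter (fun code => PySem.Str.isIn "*" code)
    else codes1
  codes2

-- ===== PORT B =====
def hard_filter_codes_alt (codes : List String) (type_to_keep : String) (ignore_discourse_nouns : Bool) : List String :=
  let required : List String :=
    (if type_to_keep == "feature" then ["1"]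
     else if type_to_keep == "discourse" then ["2"]
     else [])
    ++ (if ignore_discourse_nouns then ["*"] else [])
  codes.filter (fun code => required.all (fun m => PySem.Str.isIn m code))

-- ===== PRECONDITION & SPEC =====
def Spec_hard_filter_codes (codes : List String) (type_to_keep : String) (ignore_discourse_nouns : Bool) (out : List String) : Prop := out = hard_filter_codes_alt codes type_to_keep ignore_discourse_nouns
instance (codes : List String) (type_to_keep : String) (ignore_discourse_nouns : Bool) (out : List String) : Decidable (Spec_hard_filter_codes codes type_to_keep ignore_discourse_nouns out) := by unfold Spec_hard_filter_codes; infer_instance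

-- ===== CLAIM =====
def Claim_equal_hard_filter_codes : Prop := ∀ (codes : List String) (type_to_keep : String) (ignore_discourse_nouns : Bool), Dom_hard_filter_codes codes type_to_keep ignore_discourse_nouns → Spec_hard_filter_codes codes type_to_keep ignore_discourse_nouns (hard_filter_codes codes type_to_keep ignore_discourse_nouns)

-- ===== LEMMAS AND PROOFS =====

-- ===== VERDICT =====
theorem hard_filter_codes_spec : Claim_equal_hard_filter_codes := by
  intro codes type_to_keep ignore_discourse_nouns _
  unfold Spec_hard_filter_codes hard_filter_codes hard_filter_codes_alt
  by_cases hf : type_to_keep == "feature" <;>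
    by_cases hd : type_to_keep == "discourse" <;>
      cases ignore_discourse_nouns <;>
        simp [hf, hd, List.filter_filter, List.all, Bool.and_comm]
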